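-- pv_equiv track=rewrite | github.com/10234567Z/aptos-core | scripts/apply_gas_multiplier.py | find_macro_bounds
-- ===== SOURCE A (Python) =====
-- def find_macro_bounds(text):
--     """
--     Find the character range [start, end) of the body inside
--     define_gas_parameters!(...).  `start` is the position just after the
--     opening '(' and `end` is the position of the matching ')'.
--     Returns (start, end) or (-1, -1) if not found.
--     """
--     idx = text.find("define_gas_parameters!")
--     if idx == -1:
--         return -1, -1
--     # Advance to the opening '('
--     i = idx + len("define_gas_parameters!")
--     n = len(text)
--     while i < n and text[i] != "(":
--         i += 1
--     if i >= n:
--         return -1, -1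
--     open_paren = i + 1  # body starts after '('
--     depth = 1
--     i += 1
--     while i < n and depth > 0:
--         c = text[i]
--         if c == "(":
--             depth += 1
--         elif c == ")":
--             depth -= 1
--             if depth == 0:
--                 return open_paren, i
--         elif c == "{":
--             brace = 1
--             i += 1
--             while i < n and brace > 0:
--                 if text[i] == "{":
--                     brace += 1
--                 elif text[i] == "}":
--                     brace -= 1
--                 i += 1
--             continue
--         elif c == '"':
--             i += 1
--             while i < n and text[i] != '"':
--                 if text[i] == "\\" and i + 1 < n:
--                     i += 1
--                 i += 1
--         i += 1
--     return -1, -1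
-- ===== SOURCE B (Python) =====
-- def find_macro_bounds(text):
--     """
--     Same contract as A, but the nested skip loops are flattened into a
--     single character scan driven by a mode variable
--     (0 = normal, 1 = inside braces, 2 = inside a string literal).
--     """
--     idx = text.find("define_gas_parameters!")
--     if idx == -1:
--         return -1, -1
--     n = len(text)
--     i = idx + len("define_gas_parameters!")
--     while i < n and text[i] != "(":
--         i += 1
--     if i >= n:
--         return -1, -1
--     open_paren = i + 1
--     depth = 1
--     mode = 0
--     brace = 0
--     esc = False
--     for j in range(open_paren, n):
--         c = text[j]
--         if mode == 1:
--             if c == "{":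
--                 brace += 1
--             elif c == "}":
--                 brace -= 1
--                 if brace == 0:
--                     mode = 0
--         elif mode == 2:
--             if esc:
--                 esc = False
--             elif c == "\\":
--                 esc = True
--             elif c == '"':
--                 mode = 0
--         else:
--             if c == "(":
--                 depth += 1
--             elif c == ")":
--                 depth -= 1
--                 if depth == 0:
--                     return open_paren, j
--             elif c == "{":
--                 mode = 1
--                 brace = 1
--             elif c == '"':
--                 mode = 2
--                 esc = False
--     return -1, -1
-- ===== Notes on version B (the rewrite author's own statement) =====
-- stated objective: simpler
-- what changed: A's two nested inner while-loops that skip brace blocks and string literals are replaced by a single flat left-to-right scan driven by a mode variable (normal / in-braces / in-string with an escape flag) alongside the paren depth.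
import Mathlib
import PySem

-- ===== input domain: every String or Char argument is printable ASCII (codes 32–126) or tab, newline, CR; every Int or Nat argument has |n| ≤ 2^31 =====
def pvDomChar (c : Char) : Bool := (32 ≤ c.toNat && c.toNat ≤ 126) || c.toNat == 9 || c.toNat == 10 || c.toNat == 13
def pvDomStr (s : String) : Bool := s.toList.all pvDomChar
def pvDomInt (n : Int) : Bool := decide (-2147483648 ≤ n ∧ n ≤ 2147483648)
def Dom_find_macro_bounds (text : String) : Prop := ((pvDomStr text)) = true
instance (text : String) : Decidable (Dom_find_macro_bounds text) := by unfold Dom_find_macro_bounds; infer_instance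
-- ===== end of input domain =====

-- B replaces A's nested inner skip-loops (brace block, string literal) by ONE flat
-- character scan driven by a mode variable; objective: simpler control flow, same cost.

-- ===== PORT A =====
-- A's `while i < n and text[i] != "("` loop
def pvSkipToParenA : List Char → Int → Option (List Char × Int)
  | [], _ => none
  | c :: rest, i => if c = '(' then some (rest, i) else pvSkipToParenA rest (i + 1)

-- A's inner brace-skipping `while i < n and brace > 0` loop: per char update brace,
-- advance i, re-check the `brace > 0` condition
def pvSkipBraceA : List Char → Int → Int → (List Char × Int)
  | [], i, _ => ([], i)
  | c :: rest, i, b =>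
    if c = '{' then
      (if b + 1 ≤ 0 then (rest, i + 1) else pvSkipBraceA rest (i + 1) (b + 1))
    else if c = '}' then
      (if b - 1 ≤ 0 then (rest, i + 1) else pvSkipBraceA rest (i + 1) (b - 1))
    else (if b ≤ 0 then (rest, i + 1) else pvSkipBraceA rest (i + 1) b)

-- A's inner string-skipping `while` loop (stops AT the closing quote; a backslash
-- with a following char consumes both, a trailing backslash is an ordinary char)
def pvSkipStringA : List Char → Int → (List Char × Int)
  | [], i => ([], i)
  | c :: rest, i =>
    if c = '"' then (c :: rest, i)
    else if c = '\\' then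
      match rest with
      | [] => ([], i + 1)
      | _ :: rest' => pvSkipStringA rest' (i + 2)
    else pvSkipStringA rest (i + 1)

theorem pvSkipStringA_cons (c : Char) (rest : List Char) (i : Int) :
    pvSkipStringA (c :: rest) i =
      if c = '"' then (c :: rest, i)
      else if c = '\\' then
        (match rest with
         | [] => ([], i + 1)
         | _ :: rest' => pvSkipStringA rest' (i + 2))
      else pvSkipStringA rest (i + 1) := by
  cases rest <;> rfl

-- the next lemmas are cited by pvMainA's decreasing_by
theorem pvTail_len (l : List Char) : l.tail.length ≤ l.length := by
  cases l <;> simp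

theorem pvSkipBraceA_len (l : List Char) : ∀ (i b : Int), (pvSkipBraceA l i b).1.length ≤ l.length := by
  induction l with
  | nil => intro i b; simp [pvSkipBraceA]
  | cons c rest ih =>
    intro i b
    simp only [pvSkipBraceA, List.length_cons]
    split_ifs <;> first
      | simp
      | exact le_trans (ih _ _) (Nat.le_succ _)

theorem pvSkipStringA_len_aux (n : Nat) : ∀ (l : List Char), l.length ≤ n → ∀ (i : Int), (pvSkipStringA l i).1.length ≤ l.length := by
  induction n with
  | zero =>
    intro l hl i
    have : l = [] := List.length_eq_zero_iff.mp (Nat.le_zero.mp hl)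
    subst this; simp [pvSkipStringA]
  | succ n ih =>
    intro l hl i
    match l with
    | [] => simp [pvSkipStringA]
    | c :: rest =>
      have hr : rest.length ≤ n := by
        simp only [List.length_cons] at hl; omega
      by_cases hq : c = '"'
      · simp [pvSkipStringA_cons, hq]
      · by_cases hb : c = '\\'
        · subst hb
          match rest with
          | [] => simp [pvSkipStringA_cons, hq]
          | c2 :: r =>
            have hrn : r.length ≤ n := by simp at hr; omega
            simp only [pvSkipStringA_cons, if_neg hq, List.length_cons]
            exact le_trans (ih r hrn (i + 2)) (by omega)
        · simp only [pvSkipStringA_cons, if_neg hq, if_neg hb, List.length_cons]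
          exact le_trans (ih rest hr (i + 1)) (Nat.le_succ _)

theorem pvSkipStringA_len (l : List Char) (i : Int) : (pvSkipStringA l i).1.length ≤ l.length :=
  pvSkipStringA_len_aux l.length l le_rfl i

-- A's main `while i < n and depth > 0` loop
def pvMainA (l : List Char) (i d op : Int) : Int × Int :=
  match l with
  | [] => (-1, -1)
  | c :: rest =>
    if c = '(' then pvMainA rest (i + 1) (d + 1) op
    else if c = ')' then
      (if d - 1 = 0 then (op, i) else pvMainA rest (i + 1) (d - 1) op)
    else if c = '{' then
      let p := pvSkipBraceA rest (i + 1) 1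
      pvMainA p.1 p.2 d op
    else if c = '"' then
      let p := pvSkipStringA rest (i + 1)
      -- the outer `i += 1` steps past the closing quote
      pvMainA p.1.tail (p.2 + 1) d op
    else pvMainA rest (i + 1) d op
termination_by l.length
decreasing_by
  · simp
  · simp
  · exact Nat.lt_succ_of_le (pvSkipBraceA_len rest (i + 1) 1)
  · exact Nat.lt_succ_of_le (le_trans (pvTail_len _) (pvSkipStringA_len rest (i + 1)))
  · simp

def find_macro_bounds (text : String) : Int × Int :=
  let idx := PySem.Str.find text "define_gas_parameters!"
  if idx = -1 then (-1, -1)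
  else
    match pvSkipToParenA (text.toList.drop (idx + 22).toNat) (idx + 22) with
    | none => (-1, -1)
    | some (rest, i) => pvMainA rest (i + 1) 1 (i + 1)

-- ===== PORT B =====
-- B's `while i < n and text[i] != "("` loop (same prelude as A)
def pvSkipToParenB : List Char → Int → Option (List Char × Int)
  | [], _ => none
  | c :: rest, i => if c = '(' then some (rest, i) else pvSkipToParenB rest (i + 1)

-- B's single flat `for j in range(open_paren, n)` scan:
-- mode 0 = normal, 1 = inside braces, 2 = inside a string literal
def pvScanB (l : List Char) (j : Int) (mode : Nat) (brace : Int) (esc : Bool) (depth op : Int) : Int × Int :=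
  match l with
  | [] => (-1, -1)
  | c :: rest =>
    match mode with
    | 1 =>
      if c = '{' then pvScanB rest (j + 1) 1 (brace + 1) esc depth op
      else if c = '}' then
        (if brace - 1 = 0 then pvScanB rest (j + 1) 0 (brace - 1) esc depth op
         else pvScanB rest (j + 1) 1 (brace - 1) esc depth op)
      else pvScanB rest (j + 1) 1 brace esc depth op
    | 2 =>
      if esc then pvScanB rest (j + 1) 2 brace false depth op
      else if c = '\\' then pvScanB rest (j + 1) 2 brace true depth op
      else if c = '"' then pvScanB rest (j + 1) 0 brace esc depth op
      else pvScanB rest (j + 1) 2 brace esc depth op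
    | _ =>
      if c = '(' then pvScanB rest (j + 1) 0 brace esc (depth + 1) op
      else if c = ')' then
        (if depth - 1 = 0 then (op, j)
         else pvScanB rest (j + 1) 0 brace esc (depth - 1) op)
      else if c = '{' then pvScanB rest (j + 1) 1 1 esc depth op
      else if c = '"' then pvScanB rest (j + 1) 2 brace false depth op
      else pvScanB rest (j + 1) 0 brace esc depth op

def find_macro_bounds_alt (text : String) : Int × Int :=
  let idx := PySem.Str.find text "define_gas_parameters!"
  if idx = -1 then (-1, -1)
  else
    match pvSkipToParenB (text.toList.drop (idx + 22).toNat) (idx + 22) with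
    | none => (-1, -1)
    | some (rest, i) => pvScanB rest (i + 1) 0 0 false 1 (i + 1)

-- ===== PRECONDITION & SPEC =====
def Spec_find_macro_bounds (text : String) (out : Int × Int) : Prop := out = find_macro_bounds_alt text
instance (text : String) (out : Int × Int) : Decidable (Spec_find_macro_bounds text out) := by unfold Spec_find_macro_bounds; infer_instance

-- ===== CLAIM (what is proved, stated in full; the proofs are below) =====
def Claim_equal_find_macro_bounds : Prop := ∀ (text : String), Dom_find_macro_bounds text → Spec_find_macro_bounds text (find_macro_bounds text)

-- ===== LEMMAS AND PROOFS =====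

theorem pvSkipToParen_eq (l : List Char) : ∀ i : Int, pvSkipToParenB l i = pvSkipToParenA l i := by
  induction l with
  | nil => intro i; rfl
  | cons c rest ih =>
    intro i
    simp only [pvSkipToParenA, pvSkipToParenB, ih]

-- A-side view of B's string mode when the escape flag is set: the pending char is consumed first
def pvSSE : Bool → List Char → Int → (List Char × Int)
  | false, l, j => pvSkipStringA l j
  | true, [], j => ([], j)
  | true, _ :: rest, j => pvSkipStringA rest (j + 1)

theorem pvString_eq (l : List Char) : ∀ (e : Bool) (j b d op : Int),
    pvScanB l j 2 b e d op =
      pvScanB (pvSSE e l j).1.tail ((pvSSE e l j).2 + 1) 0 b false d op := by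
  induction l with
  | nil => intro e j b d op; cases e <;> simp [pvScanB, pvSSE, pvSkipStringA]
  | cons c rest ih =>
    intro e j b d op
    cases e with
    | true =>
      show pvScanB rest (j + 1) 2 b false d op = _
      rw [ih false]
      rfl
    | false =>
      by_cases hq : c = '"'
      · subst hq; simp [pvScanB, pvSSE, pvSkipStringA_cons]
      · by_cases hb : c = '\\'
        · subst hb
          have h1 : pvScanB ('\\' :: rest) j 2 b false d op = pvScanB rest (j + 1) 2 b true d op := by
            simp [pvScanB]
          have h2 : pvSSE true rest (j + 1) = pvSSE false ('\\' :: rest) j := by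
            cases rest <;> simp [pvSSE, pvSkipStringA, pvSkipStringA_cons] <;> ring_nf
          rw [h1, ih true, h2]
        · have h1 : pvScanB (c :: rest) j 2 b false d op = pvScanB rest (j + 1) 2 b false d op := by
            simp [pvScanB, hb, hq]
          have h2 : pvSSE false (c :: rest) j = pvSSE false rest (j + 1) := by
            simp [pvSSE, pvSkipStringA_cons, hq, hb]
          rw [h1, ih false, h2]

theorem pvBrace_eq (l : List Char) : ∀ (j b : Int), 1 ≤ b → ∀ (e : Bool) (d op : Int),
    pvScanB l j 1 b e d op =
      pvScanB (pvSkipBraceA l j b).1 (pvSkipBraceA l j b).2 0 0 e d op := by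
  induction l with
  | nil => intro j b _ e d op; simp [pvScanB, pvSkipBraceA]
  | cons c rest ih =>
    intro j b hb e d op
    by_cases ho : c = '{'
    · subst ho
      have hne : ¬ (b + 1 ≤ 0) := by omega
      have h1 : pvScanB ('{' :: rest) j 1 b e d op = pvScanB rest (j + 1) 1 (b + 1) e d op := by
        simp [pvScanB]
      have h2 : pvSkipBraceA ('{' :: rest) j b = pvSkipBraceA rest (j + 1) (b + 1) := by
        simp [pvSkipBraceA, hne]
      rw [h1, h2, ih (j + 1) (b + 1) (by omega) e d op]
    · by_cases hc : c = '}'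
      · subst hc
        by_cases h0 : b - 1 = 0
        · have hle : b - 1 ≤ 0 := by omega
          have h1 : pvScanB ('}' :: rest) j 1 b e d op = pvScanB rest (j + 1) 0 (b - 1) e d op := by
            simp [pvScanB, h0]
          have h2 : pvSkipBraceA ('}' :: rest) j b = (rest, j + 1) := by
            simp [pvSkipBraceA, hle]
          rw [h1, h2, h0]
        · have hne : ¬ (b - 1 ≤ 0) := by omega
          have h1 : pvScanB ('}' :: rest) j 1 b e d op = pvScanB rest (j + 1) 1 (b - 1) e d op := by
            simp [pvScanB, h0]
          have h2 : pvSkipBraceA ('}' :: rest) j b = pvSkipBraceA rest (j + 1) (b - 1) := by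
            simp [pvSkipBraceA, hne]
          rw [h1, h2, ih (j + 1) (b - 1) (by omega) e d op]
      · have hne : ¬ (b ≤ 0) := by omega
        have h1 : pvScanB (c :: rest) j 1 b e d op = pvScanB rest (j + 1) 1 b e d op := by
          simp [pvScanB, ho, hc]
        have h2 : pvSkipBraceA (c :: rest) j b = pvSkipBraceA rest (j + 1) b := by
          simp [pvSkipBraceA, ho, hc, hne]
        rw [h1, h2, ih (j + 1) b hb e d op]

theorem pvMain_eq (n : Nat) : ∀ (l : List Char), l.length ≤ n → ∀ (i d op b : Int) (e : Bool),
    pvMainA l i d op = pvScanB l i 0 b e d op := by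
  induction n with
  | zero =>
    intro l hl i d op b e
    have : l = [] := List.length_eq_zero_iff.mp (Nat.le_zero.mp hl)
    subst this; simp [pvMainA, pvScanB]
  | succ n ih =>
    intro l hl i d op b e
    match l with
    | [] => simp [pvMainA, pvScanB]
    | c :: rest =>
      have hr : rest.length ≤ n := by simp only [List.length_cons] at hl; omega
      by_cases h1 : c = '('
      · simp only [pvMainA, pvScanB, if_pos h1]
        exact ih rest hr (i + 1) (d + 1) op b e
      · by_cases h2 : c = ')'
        · by_cases hd : d - 1 = 0
          · simp [pvMainA, pvScanB, h1, h2, hd]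
          · simp only [pvMainA, pvScanB, if_neg h1, if_pos h2, if_neg hd]
            exact ih rest hr (i + 1) (d - 1) op b e
        · by_cases h3 : c = '{'
          · simp only [pvMainA, pvScanB, if_neg h1, if_neg h2, if_pos h3]
            rw [pvBrace_eq rest (i + 1) 1 (le_refl 1) e d op]
            exact ih _ (le_trans (pvSkipBraceA_len rest (i + 1) 1) hr) _ d op 0 e
          · by_cases h4 : c = '"'
            · simp only [pvMainA, pvScanB, if_neg h1, if_neg h2, if_neg h3, if_pos h4]
              rw [pvString_eq rest false (i + 1) b d op]
              exact ih _ (le_trans (le_trans (pvTail_len _) (pvSkipStringA_len rest (i + 1))) hr)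
                _ d op b false
            · simp only [pvMainA, pvScanB, if_neg h1, if_neg h2, if_neg h3, if_neg h4]
              exact ih rest hr (i + 1) d op b e

-- ===== VERDICT (by name: the statement is the Claim_ definition above) =====
theorem find_macro_bounds_spec : Claim_equal_find_macro_bounds := by
  intro text _
  unfold Spec_find_macro_bounds find_macro_bounds find_macro_bounds_alt
  simp only [pvSkipToParen_eq]
  split
  · rfl
  · split
    · rfl
    · exact pvMain_eq _ _ (le_refl _) _ _ _ _ _
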